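-- pv_equiv track=rewrite | github.com/worv-ai/CostNav | costnav_isaacsim/costnav_isaacsim/src/costnav_isaacsim/mission_manager/mission_manager.py | _classify_property_from_prim_path
-- ===== SOURCE A (Python) =====
-- from typing import TYPE_CHECKING, Callable, Optional
--
-- PROPERTY_PRIM_PATHS = {
--     "fire_hydrant": [
--         "/World/Environment/SM_StreetDetails_001/SM_StreetDetails_001/Section19",
--         "/World/Environment/SM_StreetDetails_002/SM_StreetDetails_03/SM_StreetDetails_002/Section53",
--         "/World/Environment/SM_StreetDetails_003/SM_StreetDetails_003/Section57",
--         "/World/Environment/SM_StreetDetails_004/SM_StreetDetails_004/Section55",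
--     ],
--     "traffic_light": [
--         "/World/Environment/SM_StreetDetails_002/SM_StreetDetails_03/SM_StreetDetails_002/Section32",
--         "/World/Environment/SM_StreetDetails_003/SM_StreetDetails_003/Section31",
--         "/World/Environment/SM_StreetDetails_004/SM_StreetDetails_004/Section31",
--         "/World/Environment/SM_StreetDetails_001/SM_StreetDetails_001/Section12",
--         "/World/Environment/SM_StreetDetails_002/SM_StreetDetails_03/SM_StreetDetails_002/Section39",
--         "/World/Environment/SM_StreetDetails_001/SM_StreetDetails_001/Section39",
--         "/World/Environment/SM_StreetDetails_003/SM_StreetDetails_003/Section41",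
--         "/World/Environment/SM_StreetDetails_004/SM_StreetDetails_004/Section41",
--     ],
--     "street_lamp": [
--         "/World/Environment/SM_StreetDetails_001/SM_StreetDetails_001/Section1",
--         "/World/Environment/SM_StreetDetails_002/SM_StreetDetails_03/SM_StreetDetails_002/Section1",
--         "/World/Environment/SM_StreetDetails_003/SM_StreetDetails_003/Section1",
--         "/World/Environment/SM_StreetDetails_004/SM_StreetDetails_004/Section1",
--         "/World/Environment/SM_StreetDetails_003/SM_StreetDetails_003/Section78",
--     ],
--     "bollard": [
--         "/World/Environment/SM_StreetDetails_003/SM_StreetDetails_003/Section77",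
--         "/World/Environment/SM_StreetDetails_001/SM_StreetDetails_001/Section31",
--     ],
--     # Building prims are matched broadly via prefix; keep only explicit non-standard
--     # building-related prims here (e.g., cubes that represent building parts).
--     "building": [
--         "/World/box/Cube",
--         "/World/box/Cube_01",
--         "/World/box/Cube_02",
--         "/World/box/Cube_03",
--         "/World/box/Cube_04",
--         "/World/box/Cube_05",
--         "/World/box/Cube_06",
--         "/World/box/Cube_07",
--         "/World/box/Cube_08",
--         "/World/box/Cube_09",
--         "/World/box/Cube_10",
--         "/World/box/Cube_11",
--         "/World/box/Cube_12",
--         "/World/box/Cube_13",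
--     ],
--     "trash_bin": [
--         "/World/Environment/SM_Buidlng_032/SM_Buidlng_032/Section26",
--     ],
--     "mail_box": [
--         "/World/Environment/SM_StreetDetails_001/SM_StreetDetails_001/Section20",
--         "/World/Environment/SM_StreetDetails_001/SM_StreetDetails_001/Section85",
--         "/World/Environment/SM_StreetDetails_002/SM_StreetDetails_03/SM_StreetDetails_002/Section55",
--         "/World/Environment/SM_StreetDetails_002/SM_StreetDetails_03/SM_StreetDetails_002/Section18",
--         "/World/Environment/SM_StreetDetails_003/SM_StreetDetails_003/Section18",
--         "/World/Environment/SM_StreetDetails_004/SM_StreetDetails_004/Section18",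
--         "/World/Environment/SM_StreetDetails_004/SM_StreetDetails_004/Section57",
--     ],
--     "newspaper_box": [
--         "/World/Environment/SM_StreetDetails_002/SM_StreetDetails_03/SM_StreetDetails_002/Section21",
--         "/World/Environment/SM_StreetDetails_003/SM_StreetDetails_003/Section21",
--         "/World/Environment/SM_StreetDetails_004/SM_StreetDetails_004/Section21",
--         "/World/Environment/SM_StreetDetails_001/SM_StreetDetails_001/Section23",
--     ],
--     "bus_stop": [
--         "/World/Environment/SM_StreetDetails_001/SM_StreetDetails_001/Section8",
--         "/World/Environment/SM_StreetDetails_002/SM_StreetDetails_03/SM_StreetDetails_002/Section6",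
--         "/World/Environment/SM_StreetDetails_003/SM_StreetDetails_003/Section6",
--         "/World/Environment/SM_StreetDetails_004/SM_StreetDetails_004/Section6",
--     ],
-- }
--
-- def _classify_property_from_prim_path(prim_path: str) -> Optional[str]:
--     if not prim_path:
--         return None
--     # Exception in trash bin path.
--     if prim_path.startswith("/World/Environment/SM_Buidlng_032/SM_Buidlng_032/Section26"):
--         return "trash_bin"
--     # Broad match for any building prims (handle both SM_Buidlng_ and SM_Buildlng_)
--     if prim_path.startswith("/World/Environment/SM_Buidlng_") or prim_path.startswith(
--         "/World/Environment/SM_Buildlng_"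
--     ):
--         return "building"
--     for category, paths in PROPERTY_PRIM_PATHS.items():
--         for base_path in paths:
--             if prim_path == base_path or prim_path.startswith(base_path + "/"):
--                 return category
--     return None
-- ===== SOURCE B (Python) =====
-- from typing import Optional
--
-- PROPERTY_PRIM_PATHS = {
--     "fire_hydrant": [
--         "/World/Environment/SM_StreetDetails_001/SM_StreetDetails_001/Section19",
--         "/World/Environment/SM_StreetDetails_002/SM_StreetDetails_03/SM_StreetDetails_002/Section53",
--         "/World/Environment/SM_StreetDetails_003/SM_StreetDetails_003/Section57",
--         "/World/Environment/SM_StreetDetails_004/SM_StreetDetails_004/Section55",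
--     ],
--     "traffic_light": [
--         "/World/Environment/SM_StreetDetails_002/SM_StreetDetails_03/SM_StreetDetails_002/Section32",
--         "/World/Environment/SM_StreetDetails_003/SM_StreetDetails_003/Section31",
--         "/World/Environment/SM_StreetDetails_004/SM_StreetDetails_004/Section31",
--         "/World/Environment/SM_StreetDetails_001/SM_StreetDetails_001/Section12",
--         "/World/Environment/SM_StreetDetails_002/SM_StreetDetails_03/SM_StreetDetails_002/Section39",
--         "/World/Environment/SM_StreetDetails_001/SM_StreetDetails_001/Section39",
--         "/World/Environment/SM_StreetDetails_003/SM_StreetDetails_003/Section41",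
--         "/World/Environment/SM_StreetDetails_004/SM_StreetDetails_004/Section41",
--     ],
--     "street_lamp": [
--         "/World/Environment/SM_StreetDetails_001/SM_StreetDetails_001/Section1",
--         "/World/Environment/SM_StreetDetails_002/SM_StreetDetails_03/SM_StreetDetails_002/Section1",
--         "/World/Environment/SM_StreetDetails_003/SM_StreetDetails_003/Section1",
--         "/World/Environment/SM_StreetDetails_004/SM_StreetDetails_004/Section1",
--         "/World/Environment/SM_StreetDetails_003/SM_StreetDetails_003/Section78",
--     ],
--     "bollard": [
--         "/World/Environment/SM_StreetDetails_003/SM_StreetDetails_003/Section77",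
--         "/World/Environment/SM_StreetDetails_001/SM_StreetDetails_001/Section31",
--     ],
--     "building": [
--         "/World/box/Cube",
--         "/World/box/Cube_01",
--         "/World/box/Cube_02",
--         "/World/box/Cube_03",
--         "/World/box/Cube_04",
--         "/World/box/Cube_05",
--         "/World/box/Cube_06",
--         "/World/box/Cube_07",
--         "/World/box/Cube_08",
--         "/World/box/Cube_09",
--         "/World/box/Cube_10",
--         "/World/box/Cube_11",
--         "/World/box/Cube_12",
--         "/World/box/Cube_13",
--     ],
--     "trash_bin": [
--         "/World/Environment/SM_Buidlng_032/SM_Buidlng_032/Section26",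
--     ],
--     "mail_box": [
--         "/World/Environment/SM_StreetDetails_001/SM_StreetDetails_001/Section20",
--         "/World/Environment/SM_StreetDetails_001/SM_StreetDetails_001/Section85",
--         "/World/Environment/SM_StreetDetails_002/SM_StreetDetails_03/SM_StreetDetails_002/Section55",
--         "/World/Environment/SM_StreetDetails_002/SM_StreetDetails_03/SM_StreetDetails_002/Section18",
--         "/World/Environment/SM_StreetDetails_003/SM_StreetDetails_003/Section18",
--         "/World/Environment/SM_StreetDetails_004/SM_StreetDetails_004/Section18",
--         "/World/Environment/SM_StreetDetails_004/SM_StreetDetails_004/Section57",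
--     ],
--     "newspaper_box": [
--         "/World/Environment/SM_StreetDetails_002/SM_StreetDetails_03/SM_StreetDetails_002/Section21",
--         "/World/Environment/SM_StreetDetails_003/SM_StreetDetails_003/Section21",
--         "/World/Environment/SM_StreetDetails_004/SM_StreetDetails_004/Section21",
--         "/World/Environment/SM_StreetDetails_001/SM_StreetDetails_001/Section23",
--     ],
--     "bus_stop": [
--         "/World/Environment/SM_StreetDetails_001/SM_StreetDetails_001/Section8",
--         "/World/Environment/SM_StreetDetails_002/SM_StreetDetails_03/SM_StreetDetails_002/Section6",
--         "/World/Environment/SM_StreetDetails_003/SM_StreetDetails_003/Section6",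
--         "/World/Environment/SM_StreetDetails_004/SM_StreetDetails_004/Section6",
--     ],
-- }
--
-- # One flat table: base path -> category.
-- _PATH_TO_CATEGORY = {
--     base_path: category
--     for category, paths in PROPERTY_PRIM_PATHS.items()
--     for base_path in paths
-- }
--
--
-- def _classify_property_from_prim_path(prim_path: str) -> Optional[str]:
--     # Exception in trash bin path.
--     if prim_path.startswith("/World/Environment/SM_Buidlng_032/SM_Buidlng_032/Section26"):
--         return "trash_bin"
--     # Broad match for any building prims (handle both SM_Buidlng_ and SM_Buildlng_)
--     if prim_path.startswith("/World/Environment/SM_Buidlng_") or prim_path.startswith(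
--         "/World/Environment/SM_Buildlng_"
--     ):
--         return "building"
--     # Walk up the ancestors of prim_path instead of scanning the whole table:
--     # trimming at '/' yields exactly the exact-or-directory-prefix matches.
--     node = prim_path
--     while True:
--         category = _PATH_TO_CATEGORY.get(node)
--         if category is not None:
--             return category
--         if "/" not in node:
--             return None
--         node = node.rsplit("/", 1)[0]
-- ===== Notes on version B (the rewrite author's own statement) =====
-- stated objective: idiomatic
-- what changed: Instead of scanning every (category, base-path) table entry against the input with exact/prefix tests, B flattens the table into one path->category dict built once and classifies by walking the input's ancestor chain (trimming the last '/'-segment) until an ancestor is a dict key.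
import Mathlib
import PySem

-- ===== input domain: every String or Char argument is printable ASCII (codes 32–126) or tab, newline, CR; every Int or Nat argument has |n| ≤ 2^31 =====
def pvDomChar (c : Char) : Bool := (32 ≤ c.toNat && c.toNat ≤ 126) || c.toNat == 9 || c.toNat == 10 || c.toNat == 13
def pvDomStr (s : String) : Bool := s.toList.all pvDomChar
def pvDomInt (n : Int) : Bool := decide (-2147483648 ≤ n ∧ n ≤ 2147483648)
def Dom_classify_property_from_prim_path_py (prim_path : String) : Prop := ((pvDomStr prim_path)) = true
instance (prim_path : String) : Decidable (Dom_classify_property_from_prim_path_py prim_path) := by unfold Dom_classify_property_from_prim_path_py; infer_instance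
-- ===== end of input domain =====

-- B replaces A's scan of every table entry by a flat path→category map and a walk up the
-- input's '/'-ancestor chain (objective: idiomatic; same observable results, proved equal).

-- The PROPERTY_PRIM_PATHS constant (dict of category → list of base paths, insertion order),
-- shared data for both ports.
def pvPropertyPrimPaths : List (String × List String) :=
  [ ("fire_hydrant",
     [ "/World/Environment/SM_StreetDetails_001/SM_StreetDetails_001/Section19",
       "/World/Environment/SM_StreetDetails_002/SM_StreetDetails_03/SM_StreetDetails_002/Section53",
       "/World/Environment/SM_StreetDetails_003/SM_StreetDetails_003/Section57",
       "/World/Environment/SM_StreetDetails_004/SM_StreetDetails_004/Section55" ]),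
    ("traffic_light",
     [ "/World/Environment/SM_StreetDetails_002/SM_StreetDetails_03/SM_StreetDetails_002/Section32",
       "/World/Environment/SM_StreetDetails_003/SM_StreetDetails_003/Section31",
       "/World/Environment/SM_StreetDetails_004/SM_StreetDetails_004/Section31",
       "/World/Environment/SM_StreetDetails_001/SM_StreetDetails_001/Section12",
       "/World/Environment/SM_StreetDetails_002/SM_StreetDetails_03/SM_StreetDetails_002/Section39",
       "/World/Environment/SM_StreetDetails_001/SM_StreetDetails_001/Section39",
       "/World/Environment/SM_StreetDetails_003/SM_StreetDetails_003/Section41",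
       "/World/Environment/SM_StreetDetails_004/SM_StreetDetails_004/Section41" ]),
    ("street_lamp",
     [ "/World/Environment/SM_StreetDetails_001/SM_StreetDetails_001/Section1",
       "/World/Environment/SM_StreetDetails_002/SM_StreetDetails_03/SM_StreetDetails_002/Section1",
       "/World/Environment/SM_StreetDetails_003/SM_StreetDetails_003/Section1",
       "/World/Environment/SM_StreetDetails_004/SM_StreetDetails_004/Section1",
       "/World/Environment/SM_StreetDetails_003/SM_StreetDetails_003/Section78" ]),
    ("bollard",
     [ "/World/Environment/SM_StreetDetails_003/SM_StreetDetails_003/Section77",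
       "/World/Environment/SM_StreetDetails_001/SM_StreetDetails_001/Section31" ]),
    ("building",
     [ "/World/box/Cube",
       "/World/box/Cube_01",
       "/World/box/Cube_02",
       "/World/box/Cube_03",
       "/World/box/Cube_04",
       "/World/box/Cube_05",
       "/World/box/Cube_06",
       "/World/box/Cube_07",
       "/World/box/Cube_08",
       "/World/box/Cube_09",
       "/World/box/Cube_10",
       "/World/box/Cube_11",
       "/World/box/Cube_12",
       "/World/box/Cube_13" ]),
    ("trash_bin",
     [ "/World/Environment/SM_Buidlng_032/SM_Buidlng_032/Section26" ]),
    ("mail_box",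
     [ "/World/Environment/SM_StreetDetails_001/SM_StreetDetails_001/Section20",
       "/World/Environment/SM_StreetDetails_001/SM_StreetDetails_001/Section85",
       "/World/Environment/SM_StreetDetails_002/SM_StreetDetails_03/SM_StreetDetails_002/Section55",
       "/World/Environment/SM_StreetDetails_002/SM_StreetDetails_03/SM_StreetDetails_002/Section18",
       "/World/Environment/SM_StreetDetails_003/SM_StreetDetails_003/Section18",
       "/World/Environment/SM_StreetDetails_004/SM_StreetDetails_004/Section18",
       "/World/Environment/SM_StreetDetails_004/SM_StreetDetails_004/Section57" ]),
    ("newspaper_box",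
     [ "/World/Environment/SM_StreetDetails_002/SM_StreetDetails_03/SM_StreetDetails_002/Section21",
       "/World/Environment/SM_StreetDetails_003/SM_StreetDetails_003/Section21",
       "/World/Environment/SM_StreetDetails_004/SM_StreetDetails_004/Section21",
       "/World/Environment/SM_StreetDetails_001/SM_StreetDetails_001/Section23" ]),
    ("bus_stop",
     [ "/World/Environment/SM_StreetDetails_001/SM_StreetDetails_001/Section8",
       "/World/Environment/SM_StreetDetails_002/SM_StreetDetails_03/SM_StreetDetails_002/Section6",
       "/World/Environment/SM_StreetDetails_003/SM_StreetDetails_003/Section6",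
       "/World/Environment/SM_StreetDetails_004/SM_StreetDetails_004/Section6" ]) ]

-- ===== PORT A =====
-- inner 'for base_path in paths' loop
def pvScanPaths (prim_path cat : String) (paths : List String) : Option String :=
  match paths with
  | [] => none
  | b :: rest =>
      if prim_path == b || PySem.Str.startswith prim_path (b ++ "/") then some cat
      else pvScanPaths prim_path cat rest

-- outer 'for category, paths in PROPERTY_PRIM_PATHS.items()' loop
def pvScanCats (prim_path : String) (items : List (String × List String)) : Option String :=
  match items with
  | [] => none
  | (cat, paths) :: rest =>
      match pvScanPaths prim_path cat paths with
      | some c => some c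
      | none => pvScanCats prim_path rest

def classify_property_from_prim_path_py (prim_path : String) : Option String :=
  if prim_path == "" then none
  else if PySem.Str.startswith prim_path "/World/Environment/SM_Buidlng_032/SM_Buidlng_032/Section26" then some "trash_bin"
  else if PySem.Str.startswith prim_path "/World/Environment/SM_Buidlng_" ||
          PySem.Str.startswith prim_path "/World/Environment/SM_Buildlng_" then some "building"
  else pvScanCats prim_path pvPropertyPrimPaths

-- ===== PORT B =====
-- _PATH_TO_CATEGORY, the flat base_path → category dict (association list, insertion order;
-- all base paths are distinct, so plain appending builds the comprehension's dict)
def pvFlatTable : List (String × String) :=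
  pvPropertyPrimPaths.foldl (fun acc e => acc ++ e.2.map (fun b => (b, e.1))) []

-- node.rsplit("/", 1)[0] for a node containing '/' — exact: everything before the LAST '/'
def pvTrim (l : List Char) : List Char := ((l.reverse.dropWhile (· != '/')).tail).reverse

theorem pvTrim_length_lt (l : List Char) (h : '/' ∈ l) : (pvTrim l).length < l.length := by
  unfold pvTrim
  have hd : l.reverse.dropWhile (· != '/') ≠ [] := by
    intro hnil
    have := List.dropWhile_eq_nil_iff.mp hnil
    have := this '/' (by simpa using h)
    simp at this
  have : (l.reverse.dropWhile (· != '/')).length ≤ l.reverse.length :=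
    List.length_dropWhile_le _ _
  have hpos : 0 < (l.reverse.dropWhile (· != '/')).length := List.length_pos_iff.mpr hd
  simp only [List.length_reverse, List.length_tail]
  simp only [List.length_reverse] at this
  omega

-- the while-loop of B: dict lookup (first match) on the node, else trim the last segment
def pvWalk (node : List Char) : Option String :=
  match (pvFlatTable.find? (fun e => e.1 == String.ofList node)).map Prod.snd with
  | some c => some c
  | none => if '/' ∈ node then pvWalk (pvTrim node) else none
termination_by node.length
decreasing_by exact pvTrim_length_lt _ (by assumption)

def classify_property_from_prim_path_py_alt (prim_path : String) : Option String :=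
  if PySem.Str.startswith prim_path "/World/Environment/SM_Buidlng_032/SM_Buidlng_032/Section26" then some "trash_bin"
  else if PySem.Str.startswith prim_path "/World/Environment/SM_Buidlng_" ||
          PySem.Str.startswith prim_path "/World/Environment/SM_Buildlng_" then some "building"
  else pvWalk prim_path.toList

-- ===== PRECONDITION & SPEC =====
def Spec_classify_property_from_prim_path_py (prim_path : String) (out : Option String) : Prop := out = classify_property_from_prim_path_py_alt prim_path
instance (prim_path : String) (out : Option String) : Decidable (Spec_classify_property_from_prim_path_py prim_path out) := by unfold Spec_classify_property_from_prim_path_py; infer_instance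

-- ===== CLAIM (what is proved, stated in full; the proofs are below) =====
def Claim_equal_classify_property_from_prim_path_py : Prop := ∀ (prim_path : String), Dom_classify_property_from_prim_path_py prim_path → Spec_classify_property_from_prim_path_py prim_path (classify_property_from_prim_path_py prim_path)

-- ===== LEMMAS AND PROOFS =====

-- the match test of A, as a Boolean on one table entry
def pvMB (p b : String) : Bool := p == b || PySem.Str.startswith p (b ++ "/")

theorem pvMB_iff (p b : String) :
    pvMB p b = true ↔ (p.toList = b.toList ∨ (b.toList ++ ['/']) <+: p.toList) := by
  simp [pvMB, PySem.Chars.startswith_iff, String.ext_iff]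

-- flat table = flatMap of the nested table
set_option maxRecDepth 40000 in
theorem pvFlatTable_eq :
    pvFlatTable = pvPropertyPrimPaths.flatMap (fun e => e.2.map (fun b => (b, e.1))) := by
  unfold pvFlatTable
  rw [PySem.List.foldl_append_eq_flatMap]
  simp

-- single-scan separation check: u ≠ v, and neither is a '/'-ancestor of the other
def pvDistinct : List Char → List Char → Bool
  | [], [] => false
  | [], b :: _ => !(b == '/')
  | a :: _, [] => !(a == '/')
  | a :: u', b :: v' => if a == b then pvDistinct u' v' else true

theorem pvDistinct_iff (u v : List Char) :
    pvDistinct u v = true ↔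
      (u ≠ v ∧ ¬(u ++ ['/'] <+: v) ∧ ¬(v ++ ['/'] <+: u)) := by
  fun_induction pvDistinct u v with
  | case1 => simp [pvDistinct]
  | case2 b v' => simp [pvDistinct, List.cons_prefix_cons, ne_comm]
  | case3 a u' => simp [pvDistinct, List.cons_prefix_cons, ne_comm]
  | case4 a u' b v' hab ih =>
      have hab' : a = b := by simpa using hab
      subst hab'
      simpa [pvDistinct, List.cons_prefix_cons] using ih
  | case5 a u' b v' hab =>
      have hab' : a ≠ b := by simpa using hab
      have hba' : b ≠ a := fun h => hab' h.symm
      simp [pvDistinct, hab, List.cons_prefix_cons, hab', hba']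

-- no table base path is equal to, or a '/'-ancestor of, another table entry's base path
set_option maxRecDepth 100000 in
set_option maxHeartbeats 4000000 in
theorem pvPairwiseL :
    (pvFlatTable.map (fun e => e.1.toList)).Pairwise (fun u v => pvDistinct u v = true) := by
  decide

-- every table base path is nonempty
set_option maxRecDepth 100000 in
theorem pvNonempty : ∀ e ∈ pvFlatTable, e.1.toList ≠ [] := by decide

-- the separation facts at entry level
theorem pvSep : ∀ b ∈ pvFlatTable, ∀ c ∈ pvFlatTable, b ≠ c →
    b.1.toList ≠ c.1.toList ∧ ¬(b.1.toList ++ ['/'] <+: c.1.toList) ∧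
      ¬(c.1.toList ++ ['/'] <+: b.1.toList) := by
  intro b hb c hc hbc
  have hpw := List.pairwise_iff_getElem.mp (List.pairwise_map.mp pvPairwiseL)
  rcases (List.getElem_of_mem hb) with ⟨i, hi, hbi⟩
  rcases (List.getElem_of_mem hc) with ⟨j, hj, hcj⟩
  rcases Nat.lt_trichotomy i j with hij | hij | hij
  · exact (pvDistinct_iff _ _).mp (hbi ▸ hcj ▸ hpw i j hi hj hij)
  · subst hij; rw [hbi] at hcj; exact absurd hcj hbc
  · have h5 := (pvDistinct_iff _ _).mp (hcj ▸ hbi ▸ hpw j i hj hi hij)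
    exact ⟨fun h => h5.1 h.symm, h5.2.2, h5.2.1⟩

-- A's nested loops are find? over the flattened table
theorem pvScanPaths_eq (p cat : String) (paths : List String) :
    pvScanPaths p cat paths =
      ((paths.map (fun b => (b, cat))).find? (fun e => pvMB p e.1)).map Prod.snd := by
  induction paths with
  | nil => simp [pvScanPaths]
  | cons b rest ih =>
      have hcond : (p == b || PySem.Str.startswith p (b ++ "/")) = pvMB p b := rfl
      simp only [pvScanPaths, List.map_cons, hcond]
      by_cases h : pvMB p b = true
      · rw [if_pos h, List.find?_cons_of_pos (by exact h)]
        rfl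
      · rw [if_neg (by simp [h]), List.find?_cons_of_neg (by simp [h]), ih]

theorem pvScanCats_eq (p : String) (items : List (String × List String)) :
    pvScanCats p items =
      ((items.flatMap (fun e => e.2.map (fun b => (b, e.1)))).find? (fun e => pvMB p e.1)).map
        Prod.snd := by
  induction items with
  | nil => simp [pvScanCats]
  | cons e rest ih =>
      obtain ⟨cat, paths⟩ := e
      simp only [pvScanCats, List.flatMap_cons, List.find?_append, pvScanPaths_eq, ih]
      cases (paths.map (fun b => (b, cat))).find? (fun e => pvMB p e.1) <;> simp

-- decomposition at the last '/': l = pvTrim l ++ '/' :: s with no '/' in s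
theorem pvTrim_spec (l : List Char) (h : '/' ∈ l) :
    ∃ s, l = pvTrim l ++ '/' :: s ∧ '/' ∉ s := by
  have hd : l.reverse.dropWhile (· != '/') ≠ [] := by
    intro hnil
    have := List.dropWhile_eq_nil_iff.mp hnil '/' (by simpa using h)
    simp at this
  obtain ⟨c, d', hcd⟩ := List.exists_cons_of_ne_nil hd
  have hc' : c = '/' := by
    have h2 := List.head_dropWhile_not (· != '/') hd
    have h3 : (List.dropWhile (fun x => x != '/') l.reverse).head hd = c := by
      simp only [hcd, List.head_cons]
    rw [h3] at h2
    simpa using h2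
  refine ⟨(l.reverse.takeWhile (· != '/')).reverse, ?_, ?_⟩
  · have htrim : pvTrim l = d'.reverse := by rw [pvTrim, hcd, List.tail_cons]
    have hsplit : l.reverse = l.reverse.takeWhile (· != '/') ++ c :: d' := by
      rw [← hcd]; exact (List.takeWhile_append_dropWhile).symm
    rw [htrim]
    conv_lhs => rw [← List.reverse_reverse l, hsplit]
    simp [List.reverse_append, hc']
  · intro hmem
    have := List.mem_takeWhile_imp (List.mem_reverse.mp hmem)
    simp at this

-- one trim step preserves-or-reveals ancestor matches (for b ≠ l itself)
theorem pvStep (l b : List Char) (h : '/' ∈ l) :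
    (b ++ ['/']) <+: l ↔ (b = pvTrim l ∨ (b ++ ['/']) <+: pvTrim l) := by
  obtain ⟨s, hls, hs⟩ := pvTrim_spec l h
  constructor
  · intro hpre
    -- the '/' at index b.length must lie at or before the last '/', at index (pvTrim l).length
    have hble : b.length ≤ (pvTrim l).length := by
      by_contra hgt
      push_neg at hgt
      obtain ⟨t, ht⟩ := hpre
      have ht' : l = b ++ '/' :: t := by rw [← ht]; simp
      have hdropb : l.drop b.length = '/' :: t := by
        have h2 := congrArg (List.drop b.length) ht'
        rw [h2]
        exact List.drop_left
      have hdrops : l.drop ((pvTrim l).length + 1) = s := by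
        have h2 := congrArg (List.drop ((pvTrim l).length + 1)) hls
        rw [h2, show pvTrim l ++ '/' :: s = (pvTrim l ++ ['/']) ++ s from by simp,
          show (pvTrim l).length + 1 = (pvTrim l ++ ['/']).length from by simp]
        exact List.drop_left
      have hmem : '/' ∈ l.drop ((pvTrim l).length + 1) := by
        have h1 : l.drop b.length =
            (l.drop ((pvTrim l).length + 1)).drop (b.length - (pvTrim l).length - 1) := by
          rw [List.drop_drop]; congr 1; omega
        have h4 : '/' ∈ l.drop b.length := by rw [hdropb]; simp
        rw [h1] at h4
        exact List.mem_of_mem_drop h4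
      rw [hdrops] at hmem
      exact hs hmem
    -- two prefixes of l: b ++ ['/'] and pvTrim l ++ ['/']
    have hpre2 : (pvTrim l ++ ['/']) <+: l := ⟨s, by simpa using hls.symm⟩
    have hbp : (b ++ ['/']) <+: (pvTrim l ++ ['/']) :=
      List.prefix_of_prefix_length_le hpre hpre2
        (by simp only [List.length_append, List.length_cons, List.length_nil]; omega)
    rcases Nat.lt_or_ge b.length (pvTrim l).length with hlt | hge
    · right
      have h5 := List.prefix_iff_eq_take.mp hbp
      rw [List.take_append_of_le_length
        (by simp only [List.length_append, List.length_cons, List.length_nil]; omega)] at h5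
      exact List.prefix_iff_eq_take.mpr (by simpa using h5)
    · left
      have hbl : b.length = (pvTrim l).length := by omega
      have heq : b ++ ['/'] = pvTrim l ++ ['/'] := by
        have h5 := List.prefix_iff_eq_take.mp hbp
        rw [List.take_of_length_le (by simp [hbl])] at h5
        exact h5
      exact List.append_inj_left heq (by simpa using hbl)
  · rintro (rfl | hpre)
    · exact ⟨s, by simpa using hls.symm⟩
    · exact hpre.trans ⟨'/' :: s, by simpa using hls.symm⟩

-- find? of a unique satisfying member
theorem pvFindUnique {α : Type} (l : List α) (q : α → Bool) (a : α) (ha : a ∈ l)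
    (hq : q a = true) (huniq : ∀ b ∈ l, q b = true → b = a) : l.find? q = some a := by
  induction l with
  | nil => cases ha
  | cons x xs ih =>
      by_cases hx : q x = true
      · have hxa : x = a := huniq x List.mem_cons_self hx
        subst hxa
        simp [List.find?_cons, hx]
      · simp only [Bool.not_eq_true] at hx
        have hax : a ∈ xs := by
          cases ha with
          | head => simp [hx] at hq
          | tail _ h => exact h
        simp [List.find?_cons, hx,
          ih hax (fun b hb hqb => huniq b (List.mem_cons_of_mem _ hb) hqb)]

theorem pvFindCongr {α : Type} (l : List α) (p q : α → Bool) (h : ∀ a ∈ l, p a = q a) :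
    l.find? p = l.find? q := by
  induction l with
  | nil => rfl
  | cons x xs ih =>
      have hx := h x List.mem_cons_self
      simp only [List.find?_cons, ← hx]
      cases hpx : p x
      · exact ih (fun a ha => h a (List.mem_cons_of_mem _ ha))
      · rfl

-- B's walk computes the same find? over the flat table as A's scan
theorem pvWalk_eq (node : List Char) :
    pvWalk node = (pvFlatTable.find? (fun e => pvMB (String.ofList node) e.1)).map Prod.snd := by
  rw [pvWalk]
  by_cases hex : ∃ e ∈ pvFlatTable, e.1 = String.ofList node
  · obtain ⟨e0, he0, he0k⟩ := hex
    -- e0 is the unique entry matching, for both predicates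
    have hqa : pvMB (String.ofList node) e0.1 = true := by
      rw [pvMB_iff]; left; rw [he0k]
    have hfind1 : pvFlatTable.find? (fun e => e.1 == String.ofList node) = some e0 := by
      apply pvFindUnique _ _ _ he0 (by simp [he0k])
      intro b hb hqb
      by_contra hne
      have hb1 : b.1 = String.ofList node := by simpa using hqb
      exact (pvSep b hb e0 he0 hne).1 (by rw [hb1, he0k])
    have hfind2 : pvFlatTable.find? (fun e => pvMB (String.ofList node) e.1) = some e0 := by
      apply pvFindUnique _ _ _ he0 hqa
      intro b hb hqb
      by_contra hne
      have hsep := pvSep b hb e0 he0 hne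
      rw [pvMB_iff] at hqb
      have hnl : (String.ofList node).toList = e0.1.toList := by rw [he0k]
      rcases hqb with heq | hpre
      · exact hsep.1 (by rw [← heq, hnl])
      · rw [hnl] at hpre
        exact hsep.2.1 hpre
    rw [hfind1, hfind2]
    rfl
  · push_neg at hex
    have hfind1 : pvFlatTable.find? (fun e => e.1 == String.ofList node) = none := by
      rw [List.find?_eq_none]
      intro e he
      simpa using hex e he
    rw [hfind1]
    simp only [Option.map_none]
    by_cases hsl : '/' ∈ node
    · rw [if_pos hsl, pvWalk_eq (pvTrim node)]
      congr 1
      apply (pvFindCongr _ _ _ ?_).symm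
      intro e he
      have hne : e.1 ≠ String.ofList node := hex e he
      rw [Bool.eq_iff_iff, pvMB_iff, pvMB_iff]
      simp only [String.toList_ofList]
      constructor <;> intro hcase
      · rcases hcase with heq | hpre
        · exact absurd (by simpa [String.ext_iff] using heq.symm) hne
        · rcases (pvStep node e.1.toList hsl).mp hpre with htr | htr
          · left; exact htr.symm
          · right; exact htr
      · right
        rcases hcase with heq | hpre
        · exact (pvStep node e.1.toList hsl).mpr (Or.inl heq.symm)
        · exact (pvStep node e.1.toList hsl).mpr (Or.inr hpre)
    · rw [if_neg hsl]
      symm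
      simp only [Option.map_eq_none_iff]
      rw [List.find?_eq_none]
      intro e he
      simp only [Bool.not_eq_true]
      rw [← Bool.not_eq_true, pvMB_iff]
      rintro (heq | hpre)
      · exact hex e he (by simpa [String.ext_iff] using heq.symm)
      · have hm : '/' ∈ e.1.toList ++ ['/'] := by simp
        have := hpre.subset hm
        simp only [String.toList_ofList] at this
        exact hsl this
termination_by node.length
decreasing_by exact pvTrim_length_lt _ (by assumption)

-- ===== VERDICT (by name: the statement is the Claim_ definition above) =====
theorem classify_property_from_prim_path_py_spec : Claim_equal_classify_property_from_prim_path_py := by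
  intro p _
  unfold Spec_classify_property_from_prim_path_py classify_property_from_prim_path_py
    classify_property_from_prim_path_py_alt
  by_cases h0 : p == ""
  · -- empty string: guards fail, walk finds nothing
    have hp : p = "" := by simpa using h0
    subst hp
    rw [if_pos h0, if_neg (by decide), if_neg (by decide)]
    rw [show "".toList = ([] : List Char) from rfl, pvWalk_eq]
    have hnone : pvFlatTable.find? (fun e => pvMB (String.ofList []) e.1) = none := by
      rw [List.find?_eq_none]
      intro e he
      simp only [Bool.not_eq_true]
      rw [← Bool.not_eq_true, pvMB_iff]
      rintro (heq | hpre)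
      · exact pvNonempty e he (by simpa using heq.symm)
      · simpa using hpre.length_le
    rw [hnone]
    rfl
  · rw [if_neg (by simpa using h0)]
    by_cases h1 : PySem.Str.startswith p "/World/Environment/SM_Buidlng_032/SM_Buidlng_032/Section26" = true
    · rw [if_pos h1, if_pos h1]
    · rw [if_neg h1, if_neg h1]
      by_cases h2 : (PySem.Str.startswith p "/World/Environment/SM_Buidlng_" ||
          PySem.Str.startswith p "/World/Environment/SM_Buildlng_") = true
      · rw [if_pos h2, if_pos h2]
      · rw [if_neg h2, if_neg h2, pvScanCats_eq, pvWalk_eq, ← pvFlatTable_eq]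
        simp
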